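-- pv_equiv track=rewrite | github.com/junsoopooh/Studying_Algorithm | week02/junsu/3.py | solution2
-- ===== SOURCE A (Python) =====
-- def solution2(n):
--     while True:
--         if not n % 2:
--             n //= 2
--         else:
--             break
--     if n <= 3:
--         dp = [0, 1, 1, 2]
--         return dp[n]
--     dp = []
--     for i in range(n + 1):
--         dp.append(i)
--     dp[2] = 1
--     dp[3] = 2
--
--     for i in range(4, n + 1):
--         k = i // 2
--         if i % 2:
--             for j in range(k, i):
--                 dp[i] = min(dp[i], dp[j] + i - j)
--         else:
--             dp[i] = min(dp[i], dp[k])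
--             for j in range(k + 1, i):
--                 dp[i] = min(dp[i], dp[j] + i - j)
--     return dp[n]
-- ===== SOURCE B (Python) =====
-- def solution2(n):
--     # Minimum number of increment presses to build n when doubling is free:
--     # doubling costs nothing and each increment adds a set bit, so the
--     # answer is the popcount of n, computed digit by digit.
--     count = 0
--     while n > 0:
--         count += n % 2
--         n //= 2
--     return count
-- ===== Notes on version B (the rewrite author's own statement) =====
-- stated objective: faster
-- what changed: replaces the O(n^2) DP table (inner scan over j for every i) with a popcount loop over n's binary digits, since the minimum number of increment operations with free doubling is the number of set bits
-- outside the precondition, e.g. on solution2(-1): A returns 2, B returns 0; on solution2(-2): A returns 2, B returns 0; on solution2(-3): A returns 1, B returns 0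
import Mathlib
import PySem

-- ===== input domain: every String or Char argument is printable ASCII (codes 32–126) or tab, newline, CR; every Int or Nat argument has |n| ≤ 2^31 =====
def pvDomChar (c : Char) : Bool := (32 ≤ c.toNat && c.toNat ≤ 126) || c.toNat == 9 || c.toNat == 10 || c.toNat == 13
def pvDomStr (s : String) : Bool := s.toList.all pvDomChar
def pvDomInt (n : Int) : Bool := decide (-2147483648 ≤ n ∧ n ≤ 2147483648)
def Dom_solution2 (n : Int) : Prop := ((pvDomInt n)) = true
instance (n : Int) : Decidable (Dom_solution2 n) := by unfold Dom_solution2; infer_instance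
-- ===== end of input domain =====

-- B replaces A's quadratic DP table with a popcount loop over n's binary digits
-- (the minimum number of increment operations with free doubling is the popcount).


-- ===== PORT A =====
-- the 'while True: if not n % 2: n //= 2 else: break' loop (fuel only makes it
-- total; for every n in Pre_ the fuel n.natAbs + 1 is enough, proved below)
def stripTwos : Nat → Int → Int
  | 0, n => n
  | f + 1, n =>
    if PySem.Int.mod n 2 = 0 then stripTwos f (PySem.Int.floordiv n 2) else n

-- a step of the inner 'for j' loop: dp[i] = min(dp[i], dp[j] + i - j)
def innerStep (i : Int) (dp : List Int) (j : Int) : List Int :=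
  PySem.List.pySetD dp i (min (PySem.List.pyGetD dp i 0) (PySem.List.pyGetD dp j 0 + i - j))

-- one iteration of the outer 'for i in range(4, n + 1)' loop (k = i // 2 inlined)
def outerStep (dp : List Int) (i : Int) : List Int :=
  if PySem.Int.mod i 2 ≠ 0 then
    (PySem.List.pyRange (PySem.Int.floordiv i 2) i 1).foldl (innerStep i) dp
  else
    (PySem.List.pyRange (PySem.Int.floordiv i 2 + 1) i 1).foldl (innerStep i)
      (PySem.List.pySetD dp i
        (min (PySem.List.pyGetD dp i 0) (PySem.List.pyGetD dp (PySem.Int.floordiv i 2) 0)))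

def solution2 (n : Int) : Int :=
  let m := stripTwos (n.natAbs + 1) n
  if m ≤ 3 then
    PySem.List.pyGetD [0, 1, 1, 2] m 0
  else
    let dp0 := (PySem.List.pyRange 0 (m + 1) 1).foldl (fun d i => d ++ [i]) []
    let dp1 := PySem.List.pySetD (PySem.List.pySetD dp0 2 1) 3 2
    let dp2 := (PySem.List.pyRange 4 (m + 1) 1).foldl outerStep dp1
    PySem.List.pyGetD dp2 m 0

-- ===== PORT B =====
-- the 'while n > 0: count += n % 2; n //= 2' loop
def popLoop (count : Int) (n : Int) : Int :=
  if _h : 0 < n then popLoop (count + PySem.Int.mod n 2) (PySem.Int.floordiv n 2) else count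
termination_by n.toNat
decreasing_by
  simp only [PySem.Int.floordiv_eq_ediv_of_pos (by omega : (0:Int) < 2)]
  omega

def solution2_alt (n : Int) : Int := popLoop 0 n

-- ===== PRECONDITION & SPEC =====
-- Pre_ excludes non-positive n, outside the problem's natural domain: there A either
-- diverges, raises IndexError, or (for a few negatives) returns a value via Python's
-- negative-index wraparound into the base table, an artefact of A's implementation.
def Pre_solution2 (n : Int) : Prop := 1 ≤ n
instance (n : Int) : Decidable (Pre_solution2 n) := by unfold Pre_solution2; infer_instance
def pvWitness_solution2 : Int := (6)

def Spec_solution2 (n : Int) (out : Int) : Prop := out = solution2_alt n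
instance (n : Int) (out : Int) : Decidable (Spec_solution2 n out) := by unfold Spec_solution2; infer_instance

-- ===== CLAIM (what is proved, stated in full; the proofs are below) =====
def Claim_equal_solution2 : Prop := ∀ (n : Int), Dom_solution2 n → Pre_solution2 n → Spec_solution2 n (solution2 n)

-- ===== LEMMAS AND PROOFS =====

-- bitCount facts ---------------------------------------------------------

theorem bc_two_mul (a : Int) (ha : 0 ≤ a) :
    PySem.Int.bitCount (2 * a) = PySem.Int.bitCount a := by
  rcases eq_or_lt_of_le ha with h | h
  · simp [← h]
  · have hm : PySem.Int.mod (2 * a) 2 = 0 := by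
      rw [PySem.Int.mod_eq_emod_of_pos (by omega)]; omega
    have hd : PySem.Int.floordiv (2 * a) 2 = a := by
      rw [PySem.Int.floordiv_eq_ediv_of_pos (by omega)]; omega
    rw [PySem.Int.bitCount_of_pos (by omega), hm, hd]
    simp

theorem bc_two_mul_add_one (a : Int) (ha : 0 ≤ a) :
    PySem.Int.bitCount (2 * a + 1) = PySem.Int.bitCount a + 1 := by
  have hm : PySem.Int.mod (2 * a + 1) 2 = 1 := by
    rw [PySem.Int.mod_eq_emod_of_pos (by omega)]; omega
  have hd : PySem.Int.floordiv (2 * a + 1) 2 = a := by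
    rw [PySem.Int.floordiv_eq_ediv_of_pos (by omega)]; omega
  rw [PySem.Int.bitCount_of_pos (by omega), hm, hd]
  omega

theorem bc_succ_le (n : Int) (hn : 0 ≤ n) :
    PySem.Int.bitCount (n + 1) ≤ PySem.Int.bitCount n + 1 := by
  have H : ∀ (N : Nat) (n : Int), 0 ≤ n → n.toNat ≤ N →
      PySem.Int.bitCount (n + 1) ≤ PySem.Int.bitCount n + 1 := by
    intro N
    induction N with
    | zero =>
      intro n hn hN
      have h0 : n = 0 := by omega
      subst h0; decide
    | succ N ih =>
      intro n hn hN
      rcases Int.even_or_odd n with ⟨a, ha⟩ | ⟨a, ha⟩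
      · have ha' : (0:Int) ≤ a := by omega
        have h1 : n + 1 = 2 * a + 1 := by omega
        have h2 : PySem.Int.bitCount n = PySem.Int.bitCount a := by
          rw [show n = 2 * a by omega, bc_two_mul a ha']
        rw [h1, bc_two_mul_add_one a ha', h2]
      · have ha' : (0:Int) ≤ a := by omega
        have h1 : n + 1 = 2 * (a + 1) := by omega
        have h2 : PySem.Int.bitCount n = PySem.Int.bitCount a + 1 := by
          rw [ha, bc_two_mul_add_one a ha']
        have h3 := ih a ha' (by omega)
        rw [h1, bc_two_mul (a + 1) (by omega)]
        omega
  exact H n.toNat n hn le_rfl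

theorem bc_le_linear (j i : Int) (hj : 0 ≤ j) (hij : j ≤ i) :
    (PySem.Int.bitCount i : Int) ≤ (PySem.Int.bitCount j : Int) + (i - j) := by
  have H : ∀ (d : Nat) (i : Int), i = j + d →
      (PySem.Int.bitCount i : Int) ≤ (PySem.Int.bitCount j : Int) + (i - j) := by
    intro d
    induction d with
    | zero => intro i hi; simp [hi]
    | succ d ih =>
      intro i hi
      have h1 : i = (j + d) + 1 := by omega
      have h2 := bc_succ_le (j + d) (by omega)
      have h3 := ih (j + d) rfl
      rw [h1]
      push_cast at h2 h3 ⊢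
      omega
  have hd : i = j + ((i - j).toNat : Int) := by omega
  exact H (i - j).toNat i hd

theorem bc_le_self (i : Int) (hi : 0 ≤ i) : (PySem.Int.bitCount i : Int) ≤ i := by
  have := bc_le_linear 0 i le_rfl hi
  simpa using this

-- port B computes bitCount ------------------------------------------------

theorem popLoop_eq (n : Int) (hn : 0 ≤ n) :
    ∀ c : Int, popLoop c n = c + PySem.Int.bitCount n := by
  have H : ∀ (N : Nat) (n : Int), 0 ≤ n → n.toNat ≤ N → ∀ c : Int,
      popLoop c n = c + PySem.Int.bitCount n := by
    intro N
    induction N with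
    | zero =>
      intro n hn hN c
      have h0 : n = 0 := by omega
      subst h0
      rw [popLoop]
      simp
    | succ N ih =>
      intro n hn hN c
      rw [popLoop]
      split_ifs with h
      · have hdiv : PySem.Int.floordiv n 2 = n / 2 :=
          PySem.Int.floordiv_eq_ediv_of_pos (by omega)
        have hrec := ih (PySem.Int.floordiv n 2) (by rw [hdiv]; omega)
          (by rw [hdiv]; omega) (c + PySem.Int.mod n 2)
        rw [hrec, PySem.Int.bitCount_of_pos h]
        have := PySem.Int.mod_nonneg n (by omega : (0:Int) < 2)
        push_cast
        omega
      · have h0 : n = 0 := by omega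
        subst h0; simp
  exact H n.toNat n hn le_rfl

-- the stripping loop -------------------------------------------------------

theorem stripTwos_spec (f : Nat) :
    ∀ n : Int, 1 ≤ n → n.toNat ≤ f →
      1 ≤ stripTwos f n ∧ PySem.Int.mod (stripTwos f n) 2 = 1 ∧
      PySem.Int.bitCount (stripTwos f n) = PySem.Int.bitCount n := by
  induction f with
  | zero => intro n h1 h2; omega
  | succ f ih =>
    intro n h1 h2
    rw [stripTwos]
    split_ifs with h
    · have hm : n % 2 = 0 := by
        rw [PySem.Int.mod_eq_emod_of_pos (by omega)] at h; exact h
      have hdiv : PySem.Int.floordiv n 2 = n / 2 :=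
        PySem.Int.floordiv_eq_ediv_of_pos (by omega)
      have h2n : 2 ≤ n := by omega
      have hrec := ih (PySem.Int.floordiv n 2) (by rw [hdiv]; omega) (by rw [hdiv]; omega)
      refine ⟨hrec.1, hrec.2.1, ?_⟩
      rw [hrec.2.2, PySem.Int.bitCount_of_pos (show (0:Int) < n by omega), h]
      simp
    · have hm : PySem.Int.mod n 2 = 1 := by
        rw [PySem.Int.mod_eq_emod_of_pos (by omega)] at h ⊢; omega
      exact ⟨h1, hm, rfl⟩

-- the DP table --------------------------------------------------------------

-- expected dp contents after the outer loop has processed all i' < i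
def pvE (m i : Int) : List Int :=
  (PySem.List.pyRange 0 (m + 1) 1).map
    (fun t => if t < i then (PySem.Int.bitCount t : Int) else t)

theorem length_pvE (m i : Int) : (pvE m i).length = (m + 1).toNat := by
  simp [pvE, PySem.List.length_pyRange_one]

theorem getElem_pvE (m i : Int) (t : Nat) (ht : t < (m + 1).toNat) :
    (pvE m i)[t]'(by rw [length_pvE]; exact ht) =
      if (t : Int) < i then (PySem.Int.bitCount t : Int) else (t : Int) := by
  simp [pvE, PySem.List.getElem_pyRange_one]

theorem pyGetD_pvE (m i j : Int) (hj : 0 ≤ j) (hjm : j ≤ m) :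
    PySem.List.pyGetD (pvE m i) j 0 =
      if j < i then (PySem.Int.bitCount j : Int) else j := by
  rw [PySem.List.pyGetD_eq_getElem _ 0 hj (by rw [length_pvE]; omega)]
  rw [getElem_pvE m i j.toNat (by omega)]
  rw [show ((j.toNat : Int)) = j by omega]

-- writing bitCount i at slot i advances the frontier
theorem pySetD_pvE (m i : Int) (hi : 0 ≤ i) :
    PySem.List.pySetD (pvE m i) i (PySem.Int.bitCount i : Int) = pvE m (i + 1) := by
  rw [PySem.List.pySetD_of_nonneg _ _ hi]
  apply List.ext_getElem
  · simp [length_pvE]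
  · intro t h1 h2
    rw [List.getElem_set]
    rw [List.length_set, length_pvE] at h1
    rw [getElem_pvE m (i + 1) t h1]
    split_ifs with hset hlt hlt
    · rw [show ((t : Int)) = i by omega]
    · exfalso; omega
    · rw [getElem_pvE m i t h1]
      simp [show (t:Int) < i by omega]
    · rw [getElem_pvE m i t h1]
      simp [show ¬ (t:Int) < i by omega]

-- min-fold value lemmas ------------------------------------------------------

theorem foldl_min_le_init (g : Int → Int) (js : List Int) :
    ∀ v0 : Int, js.foldl (fun v j => min v (g j)) v0 ≤ v0 := by
  induction js with
  | nil => intro v0; simp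
  | cons j js ih =>
    intro v0
    simp only [List.foldl_cons]
    exact le_trans (ih (min v0 (g j))) (min_le_left _ _)

theorem foldl_min_le_mem (g : Int → Int) (js : List Int) (j : Int) (hj : j ∈ js) :
    ∀ v0 : Int, js.foldl (fun v j => min v (g j)) v0 ≤ g j := by
  induction js with
  | nil => cases hj
  | cons a js ih =>
    intro v0
    simp only [List.foldl_cons]
    rcases List.mem_cons.mp hj with h | h
    · subst h
      exact le_trans (foldl_min_le_init g js _) (min_le_right _ _)
    · exact ih h _

theorem foldl_min_ge (g : Int → Int) (t : Int) (js : List Int)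
    (hall : ∀ j ∈ js, t ≤ g j) :
    ∀ v0 : Int, t ≤ v0 → t ≤ js.foldl (fun v j => min v (g j)) v0 := by
  induction js with
  | nil => intro v0 h0; simpa using h0
  | cons a js ih =>
    intro v0 h0
    simp only [List.foldl_cons]
    exact ih (fun j hj => hall j (List.mem_cons_of_mem a hj)) _
      (le_min h0 (hall a List.mem_cons_self))

theorem foldl_min_ext (g g' : Int → Int) (js : List Int)
    (h : ∀ j ∈ js, g j = g' j) :
    ∀ v0 : Int, js.foldl (fun v j => min v (g j)) v0 = js.foldl (fun v j => min v (g' j)) v0 := by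
  induction js with
  | nil => intro v0; rfl
  | cons a js ih =>
    intro v0
    simp only [List.foldl_cons]
    rw [h a List.mem_cons_self]
    exact ih (fun j hj => h j (List.mem_cons_of_mem a hj)) _

-- the inner j-loop only rewrites slot i; the list fold reduces to a value fold
theorem inner_fold (i : Int) (hi : 0 ≤ i) (js : List Int)
    (hjs : ∀ j ∈ js, 0 ≤ j ∧ j < i) :
    ∀ dp : List Int, i.toNat < dp.length →
      js.foldl (innerStep i) dp =
        PySem.List.pySetD dp i
          (js.foldl (fun v j => min v (PySem.List.pyGetD dp j 0 + i - j))
            (PySem.List.pyGetD dp i 0)) := by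
  induction js with
  | nil =>
    intro dp hlen
    simp only [List.foldl_nil]
    rw [PySem.List.pySetD_of_nonneg _ _ hi,
        PySem.List.pyGetD_eq_getElem _ 0 hi (by omega)]
    exact (List.set_getElem_self hlen).symm
  | cons a js ih =>
    intro dp hlen
    have ha := hjs a List.mem_cons_self
    simp only [List.foldl_cons]
    rw [innerStep]
    set w := min (PySem.List.pyGetD dp i 0) (PySem.List.pyGetD dp a 0 + i - a) with hw
    have hlen' : i.toNat < (PySem.List.pySetD dp i w).length := by
      rw [PySem.List.pySetD_of_nonneg _ _ hi, List.length_set]; exact hlen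
    rw [ih (fun j hj => hjs j (List.mem_cons_of_mem a hj)) _ hlen']
    have hread : ∀ j : Int, 0 ≤ j → j ≠ i →
        PySem.List.pyGetD (PySem.List.pySetD dp i w) j 0 = PySem.List.pyGetD dp j 0 := by
      intro j hj hne
      rw [PySem.List.pySetD_of_nonneg _ _ hi]
      rcases Nat.lt_or_ge j.toNat dp.length with hlt | hge
      · rw [PySem.List.pyGetD_eq_getElem _ 0 hj
            (by rw [List.length_set]; omega),
            PySem.List.pyGetD_eq_getElem _ 0 hj (by omega),
            List.getElem_set_ne (by omega)]
      · rw [PySem.List.pyGetD_of_none, PySem.List.pyGetD_of_none]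
        · rw [PySem.List.pyGet?_eq_none_iff]
          simp [PySem.Raise.InRange]; omega
        · rw [PySem.List.pyGet?_eq_none_iff]
          simp [PySem.Raise.InRange, List.length_set]; omega
    have hreadi : PySem.List.pyGetD (PySem.List.pySetD dp i w) i 0 = w := by
      rw [PySem.List.pySetD_of_nonneg _ _ hi,
          PySem.List.pyGetD_eq_getElem _ 0 hi (by rw [List.length_set]; omega),
          List.getElem_set_self]
    rw [hreadi]
    have hfold := foldl_min_ext
      (fun j => PySem.List.pyGetD (PySem.List.pySetD dp i w) j 0 + i - j)
      (fun j => PySem.List.pyGetD dp j 0 + i - j) js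
      (fun j hj => by
        have hjp := hjs j (List.mem_cons_of_mem a hj)
        simp only []
        rw [hread j hjp.1 (by omega)]) w
    simp only [] at hfold
    rw [hfold]
    rw [PySem.List.pySetD_of_nonneg (PySem.List.pySetD dp i w) _ hi,
        PySem.List.pySetD_of_nonneg dp w hi, List.set_set,
        ← PySem.List.pySetD_of_nonneg dp _ hi]

-- one outer iteration keeps the invariant
theorem outer_inv_step (m i : Int) (hm : 4 ≤ m) (hi4 : 4 ≤ i) (him : i ≤ m) :
    outerStep (pvE m i) i = pvE m (i + 1) := by
  have hi0 : (0:Int) ≤ i := by omega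
  have hlen : i.toNat < (pvE m i).length := by rw [length_pvE]; omega
  have hk : PySem.Int.floordiv i 2 = i / 2 := PySem.Int.floordiv_eq_ediv_of_pos (by omega)
  have hgi : PySem.List.pyGetD (pvE m i) i 0 = i := by
    rw [pyGetD_pvE m i i hi0 him]; simp
  rw [outerStep]
  simp only [hk]
  have hk2 : 2 ≤ i / 2 := by omega
  have hki : i / 2 < i := by omega
  split_ifs with hodd
  · -- i odd
    rw [inner_fold i hi0 _ (fun j hj => by
        rw [PySem.List.mem_pyRange_one] at hj; exact ⟨by omega, by omega⟩) _ hlen]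
    have hcand : ∀ j ∈ PySem.List.pyRange (i / 2) i 1,
        PySem.List.pyGetD (pvE m i) j 0 + i - j = (PySem.Int.bitCount j : Int) + i - j := by
      intro j hj
      rw [PySem.List.mem_pyRange_one] at hj
      rw [pyGetD_pvE m i j (by omega) (by omega)]
      simp [show j < i by omega]
    have hval : (PySem.List.pyRange (i / 2) i 1).foldl
        (fun v j => min v (PySem.List.pyGetD (pvE m i) j 0 + i - j))
        (PySem.List.pyGetD (pvE m i) i 0) = (PySem.Int.bitCount i : Int) := by
      apply le_antisymm
      · have hmem : i - 1 ∈ PySem.List.pyRange (i / 2) i 1 := by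
          rw [PySem.List.mem_pyRange_one]
          have : PySem.Int.mod i 2 = 1 := by
            rw [PySem.Int.mod_eq_emod_of_pos (by omega)]
            rw [PySem.Int.mod_eq_emod_of_pos (by omega)] at hodd
            omega
          constructor <;> omega
        have hle := foldl_min_le_mem
          (fun j => PySem.List.pyGetD (pvE m i) j 0 + i - j) _ _ hmem
          (PySem.List.pyGetD (pvE m i) i 0)
        rw [hcand _ hmem] at hle
        have hmod : i % 2 = 1 := by
          rw [PySem.Int.mod_eq_emod_of_pos (by omega)] at hodd; omega
        obtain ⟨a, haa⟩ : ∃ a, i = 2 * a + 1 := ⟨i / 2, by omega⟩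
        have heq : (PySem.Int.bitCount (i - 1) : Int) + i - (i - 1) =
            (PySem.Int.bitCount i : Int) := by
          rw [show i - 1 = 2 * a by omega, haa, bc_two_mul a (by omega),
              bc_two_mul_add_one a (by omega)]
          push_cast
          ring
        rw [heq] at hle
        exact hle
      · apply foldl_min_ge
        · intro j hj
          rw [hcand j hj]
          rw [PySem.List.mem_pyRange_one] at hj
          have := bc_le_linear j i (by omega) (by omega)
          omega
        · rw [hgi]; exact bc_le_self i (by omega)
    rw [hval, pySetD_pvE m i hi0]
  · -- i even
    have hmod : i % 2 = 0 := by
      rw [PySem.Int.mod_eq_emod_of_pos (by omega)] at hodd; omega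
    obtain ⟨a, haa⟩ : ∃ a, i = 2 * a := ⟨i / 2, by omega⟩
    have hka : i / 2 = a := by omega
    have hbci : PySem.Int.bitCount i = PySem.Int.bitCount a := by
      rw [haa]; exact bc_two_mul a (by omega)
    have hgk : PySem.List.pyGetD (pvE m i) (i / 2) 0 = (PySem.Int.bitCount a : Int) := by
      rw [pyGetD_pvE m i (i / 2) (by omega) (by omega)]
      simp [hka, show a < i by omega]
    have hsetval : min (PySem.List.pyGetD (pvE m i) i 0)
        (PySem.List.pyGetD (pvE m i) (i / 2) 0) = (PySem.Int.bitCount i : Int) := by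
      rw [hgi, hgk, hbci]
      have h1 : (PySem.Int.bitCount a : Int) ≤ i := by
        have := bc_le_self a (by omega); omega
      omega
    rw [hsetval, pySetD_pvE m i hi0]
    have hlen' : i.toNat < (pvE m (i + 1)).length := by rw [length_pvE]; omega
    rw [inner_fold i hi0 _ (fun j hj => by
        rw [PySem.List.mem_pyRange_one] at hj; exact ⟨by omega, by omega⟩) _ hlen']
    have hgi' : PySem.List.pyGetD (pvE m (i + 1)) i 0 = (PySem.Int.bitCount i : Int) := by
      rw [pyGetD_pvE m (i + 1) i hi0 him]; simp
    have hval : (PySem.List.pyRange (i / 2 + 1) i 1).foldl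
        (fun v j => min v (PySem.List.pyGetD (pvE m (i + 1)) j 0 + i - j))
        (PySem.List.pyGetD (pvE m (i + 1)) i 0) = (PySem.Int.bitCount i : Int) := by
      apply le_antisymm
      · rw [← hgi']
        exact foldl_min_le_init _ _ _
      · apply foldl_min_ge
        · intro j hj
          rw [PySem.List.mem_pyRange_one] at hj
          rw [pyGetD_pvE m (i + 1) j (by omega) (by omega)]
          simp only [show j < i + 1 by omega, if_pos]
          have := bc_le_linear j i (by omega) (by omega)
          omega
        · rw [hgi']
    rw [hval]
    have hfix : PySem.List.pySetD (pvE m (i + 1)) i (PySem.Int.bitCount i : Int) =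
        pvE m (i + 1) := by
      rw [PySem.List.pySetD_of_nonneg _ _ hi0]
      conv_rhs => rw [← List.set_getElem_self (as := pvE m (i + 1)) (i := i.toNat) hlen']
      congr 1
      rw [getElem_pvE m (i + 1) i.toNat (by omega)]
      simp [show ((i.toNat : Int)) = i by omega]
    rw [hfix]

-- the whole outer loop
theorem outer_inv (m : Int) (hm : 4 ≤ m) :
    ∀ (d : Nat) (i : Int), 4 ≤ i → i + d = m + 1 →
      (PySem.List.pyRange i (m + 1) 1).foldl outerStep (pvE m i) = pvE m (m + 1) := by
  intro d
  induction d with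
  | zero =>
    intro i hi4 hd
    rw [PySem.List.pyRange_one_eq_nil (by omega)]
    simp only [List.foldl_nil]
    rw [show i = m + 1 by omega]
  | succ d ih =>
    intro i hi4 hd
    rw [PySem.List.pyRange_one_cons (by omega : i < m + 1)]
    simp only [List.foldl_cons]
    rw [outer_inv_step m i hm hi4 (by omega)]
    exact ih (i + 1) (by omega) (by push_cast at hd ⊢; omega)

-- initialisation: dp after the appends and the two sets is pvE m 4
theorem dp_init (m : Int) :
    PySem.List.pySetD (PySem.List.pySetD
      ((PySem.List.pyRange 0 (m + 1) 1).foldl (fun d i => d ++ [i]) []) 2 1) 3 2 =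
    pvE m 4 := by
  rw [PySem.List.foldl_append_singleton]
  rw [List.nil_append]
  rw [PySem.List.pySetD_of_nonneg _ _ (by norm_num : (0:Int) ≤ 2),
      PySem.List.pySetD_of_nonneg _ _ (by norm_num : (0:Int) ≤ 3)]
  apply List.ext_getElem
  · simp [length_pvE, PySem.List.length_pyRange_one]
  · intro t h1 h2
    rw [length_pvE] at h2
    rw [getElem_pvE m 4 t h2]
    rw [List.getElem_set, List.getElem_set, PySem.List.getElem_pyRange_one]
    rcases Nat.lt_or_ge t 4 with ht | ht
    · interval_cases t <;> simp <;> decide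
    · split_ifs <;> omega

-- ===== VERDICT (by name: the statement is the Claim_ definition above) =====
theorem solution2_spec : Claim_equal_solution2 := by
  intro n _hdom hpre
  have hpre' : (1:Int) ≤ n := hpre
  unfold Spec_solution2
  show solution2 n = solution2_alt n
  have hstrip := stripTwos_spec (n.natAbs + 1) n hpre' (by omega)
  simp only [solution2, solution2_alt]
  set m := stripTwos (n.natAbs + 1) n with hmdef
  obtain ⟨hm1, hmodd, hbc⟩ := hstrip
  have hmodd' : m % 2 = 1 := by
    rw [PySem.Int.mod_eq_emod_of_pos (by omega)] at hmodd; omega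
  rw [popLoop_eq n (by omega), ← hbc]
  simp only [zero_add]
  split_ifs with h3
  · have hm13 : m = 1 ∨ m = 3 := by omega
    rcases hm13 with h | h <;> rw [h] <;> decide
  · have hm4 : 4 ≤ m := by omega
    rw [dp_init m]
    rw [outer_inv m hm4 (m + 1 - 4).toNat 4 le_rfl (by omega)]
    rw [pyGetD_pvE m (m + 1) m (by omega) le_rfl]
    simp [show m < m + 1 by omega]
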